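-- pv_equiv track=rewrite | github.com/Eadon999/wsd1 | coqua/cgi-bin/coquasql.py | recur_andlst_ids
-- ===== SOURCE A (Python) =====
-- def indent_query(querylst, first, last):
-- 	if querylst == []:
-- 		return []
-- 	if len(querylst) == 1:
-- 		lst = [first + querylst[0] + last]
-- 	else:
-- 		lst = [first + querylst[0]]
-- 		ind = ' ' * len(first)
-- 		for i in querylst[1:-1]:
-- 			lst.append(ind + i)
-- 		lst.append(ind + querylst[-1] + last)
-- 	return lst
--
-- def recur_andlst_ids(Alst):
-- 	lst =     [ 'SELECT recipe_id']
-- 	lst +=    [ '  FROM ingredients']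
-- 	lst +=    [F' WHERE pron = "{Alst[0]}"']
-- 	if Alst[1:] != []:
-- 		lst += [ '   AND recipe_id IN']
-- 		lst += indent_query(recur_andlst_ids(Alst[1:]), '       (',')')
-- 	return lst
-- ===== SOURCE B (Python) =====
-- def indent_query(querylst, first, last):
-- 	if querylst == []:
-- 		return []
-- 	if len(querylst) == 1:
-- 		lst = [first + querylst[0] + last]
-- 	else:
-- 		lst = [first + querylst[0]]
-- 		ind = ' ' * len(first)
-- 		for i in querylst[1:-1]:
-- 			lst.append(ind + i)
-- 		lst.append(ind + querylst[-1] + last)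
-- 	return lst
--
-- def recur_andlst_ids(Alst):
-- 	block = ['SELECT recipe_id', '  FROM ingredients', f' WHERE pron = "{Alst[-1]}"']
-- 	for p in reversed(Alst[:-1]):
-- 		block = ['SELECT recipe_id', '  FROM ingredients', f' WHERE pron = "{p}"',
-- 		         '   AND recipe_id IN'] + indent_query(block, '       (', ')')
-- 	return block
-- ===== Notes on version B (the rewrite author's own statement) =====
-- stated objective: alternative
-- what changed: Replaces A's recursion over the tail with an iterative inside-out build: the innermost WHERE block for the last element is constructed first and then wrapped once per preceding element in reverse order, so no recursion and no post-hoc wrapping of a recursive result. (both raise IndexError on the empty list, which Pre_ excludes).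
import Mathlib
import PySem

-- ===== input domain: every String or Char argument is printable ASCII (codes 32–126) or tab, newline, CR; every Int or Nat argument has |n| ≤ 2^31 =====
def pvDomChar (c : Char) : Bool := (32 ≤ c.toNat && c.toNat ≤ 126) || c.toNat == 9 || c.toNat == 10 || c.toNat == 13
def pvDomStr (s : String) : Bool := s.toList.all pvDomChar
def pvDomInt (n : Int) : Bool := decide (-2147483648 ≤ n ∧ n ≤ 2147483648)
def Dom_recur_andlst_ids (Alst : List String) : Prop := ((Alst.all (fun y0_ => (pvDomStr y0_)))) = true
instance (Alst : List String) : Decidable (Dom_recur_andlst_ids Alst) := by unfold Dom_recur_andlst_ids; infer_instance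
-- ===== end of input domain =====

-- ===== PORT A =====
-- helper indent_query, shared verbatim by A and B (B's Python keeps it unchanged).
-- ' ' * len(first): ported as replicate over first.toList.length (exact: len counts chars).
def indent_query (querylst : List String) (first last : String) : List String :=
  match querylst with
  | [] => []
  | [q] => [first ++ q ++ last]
  | q :: rest =>
    let ind : String := String.ofList (List.replicate first.toList.length ' ')
    ([first ++ q] ++ rest.dropLast.map (fun i => ind ++ i)) ++ [ind ++ rest.getLast! ++ last]

-- A: recursion on the tail; empty list raises IndexError in Python (excluded by Pre_),
-- the [] branch here is an arbitrary total-function value.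
def recur_andlst_ids : List String → List String
  | [] => []
  | a :: rest =>
    let lst := ["SELECT recipe_id", "  FROM ingredients", " WHERE pron = \"" ++ a ++ "\""]
    if rest ≠ [] then
      lst ++ ["   AND recipe_id IN"] ++ indent_query (recur_andlst_ids rest) "       (" ")"
    else lst

-- ===== PORT B =====
-- one wrapping step of B's loop body
def wrap_step (block : List String) (p : String) : List String :=
  ["SELECT recipe_id", "  FROM ingredients", " WHERE pron = \"" ++ p ++ "\"",
   "   AND recipe_id IN"] ++ indent_query block "       (" ")"

-- B: build innermost block for Alst[-1], then fold the wrapping step over reversed(Alst[:-1]).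
-- Empty list raises IndexError in B's Python too; the [] branch is arbitrary.
def recur_andlst_ids_alt (Alst : List String) : List String :=
  match Alst with
  | [] => []
  | _ :: _ =>
    let block := ["SELECT recipe_id", "  FROM ingredients",
                  " WHERE pron = \"" ++ Alst.getLast! ++ "\""]
    Alst.dropLast.reverse.foldl wrap_step block

-- ===== PRECONDITION & SPEC =====
-- Pre_: both Pythons raise IndexError on the empty list (Alst[0] / Alst[-1]).
def Pre_recur_andlst_ids (Alst : List String) : Prop := Alst ≠ []
instance (Alst : List String) : Decidable (Pre_recur_andlst_ids Alst) := by
  unfold Pre_recur_andlst_ids; infer_instance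
def pvWitness_recur_andlst_ids : List String := ["egg"]

def Spec_recur_andlst_ids (Alst : List String) (out : List String) : Prop := out = recur_andlst_ids_alt Alst
instance (Alst : List String) (out : List String) : Decidable (Spec_recur_andlst_ids Alst out) := by unfold Spec_recur_andlst_ids; infer_instance

-- ===== CLAIM (what is proved, stated in full; the proofs are below) =====
def Claim_equal_recur_andlst_ids : Prop := ∀ (Alst : List String), Dom_recur_andlst_ids Alst → Pre_recur_andlst_ids Alst → Spec_recur_andlst_ids Alst (recur_andlst_ids Alst)

-- ===== LEMMAS AND PROOFS =====

-- B unfolded to a foldr over the initial segment (foldl over the reverse = foldr).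
theorem alt_eq_foldr (Alst : List String) (h : Alst ≠ []) :
    recur_andlst_ids_alt Alst =
      Alst.dropLast.foldr (fun p b => wrap_step b p)
        ["SELECT recipe_id", "  FROM ingredients",
         " WHERE pron = \"" ++ Alst.getLast! ++ "\""] := by
  match Alst, h with
  | a :: rest, _ =>
    simp [recur_andlst_ids_alt, List.foldl_reverse]

theorem a_eq_alt (Alst : List String) (h : Alst ≠ []) :
    recur_andlst_ids Alst = recur_andlst_ids_alt Alst := by
  induction Alst with
  | nil => exact absurd rfl h
  | cons a rest ih =>
    rw [alt_eq_foldr _ h]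
    cases rest with
    | nil => simp [recur_andlst_ids]
    | cons r rs =>
      have hrest : (r :: rs : List String) ≠ [] := by simp
      have : (a :: r :: rs : List String).dropLast = a :: (r :: rs).dropLast := by
        simp [List.dropLast]
      rw [this, List.foldr_cons,
        show (a :: r :: rs : List String).getLast! = (r :: rs).getLast! by
          simp [List.getLast!, List.getLast],
        ← alt_eq_foldr _ hrest]
      rw [← ih hrest]
      simp [recur_andlst_ids, wrap_step]

-- ===== VERDICT (by name: the statement is the Claim_ definition above) =====
theorem recur_andlst_ids_spec : Claim_equal_recur_andlst_ids := by
  intro Alst _ hpre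
  unfold Spec_recur_andlst_ids
  exact a_eq_alt Alst hpre
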